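-- pv_equiv track=rewrite | github.com/PedroLauand/EvansScenario | Indices.py | evansA3
-- ===== SOURCE A (Python) =====
-- def evansA3(a0,a1,b,c0,c1):
--     #Index for joint distribution q(a0,a1,b,c0,c1) for evans scenario where |A|=3, |B|=|C|=2.
--     i=0
--     for C1 in range(2):
--         for C0 in range(2):
--             for B in range(2):
--                 for A1 in range(3):
--                     for A0 in range(3):
--                         if C1==c1 and C0==c0 and B==b and A1==a1 and A0==a0 :
--                             return i
--                         else :
--                             i=i+1
-- ===== SOURCE B (Python) =====
-- def evansA3(a0, a1, b, c0, c1):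
--     # Closed-form flattened index instead of five nested search loops.
--     if a0 in (0, 1, 2) and a1 in (0, 1, 2) and b in (0, 1) and c0 in (0, 1) and c1 in (0, 1):
--         return int(a0 + 3 * a1 + 9 * b + 18 * c0 + 36 * c1)
--     return None
-- ===== Notes on version B (the rewrite author's own statement) =====
-- stated objective: simpler
-- what changed: Replaces the five nested search loops with a range check plus the closed-form mixed-radix index a0 + 3*a1 + 9*b + 18*c0 + 36*c1.
import Mathlib
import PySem

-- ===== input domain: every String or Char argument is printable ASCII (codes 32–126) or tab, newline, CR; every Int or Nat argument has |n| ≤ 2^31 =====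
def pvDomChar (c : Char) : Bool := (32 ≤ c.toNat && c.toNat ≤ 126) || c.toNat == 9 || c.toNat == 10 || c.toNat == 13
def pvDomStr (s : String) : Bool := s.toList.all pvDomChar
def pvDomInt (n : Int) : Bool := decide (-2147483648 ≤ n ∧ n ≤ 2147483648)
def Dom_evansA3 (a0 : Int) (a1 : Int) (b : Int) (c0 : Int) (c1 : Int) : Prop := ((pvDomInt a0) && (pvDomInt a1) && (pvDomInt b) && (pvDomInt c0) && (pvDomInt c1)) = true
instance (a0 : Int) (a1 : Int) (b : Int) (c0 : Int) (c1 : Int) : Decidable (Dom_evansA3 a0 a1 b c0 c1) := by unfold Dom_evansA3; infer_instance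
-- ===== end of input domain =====

-- B replaces A's five nested search loops by a range check plus the closed-form
-- mixed-radix index a0 + 3*a1 + 9*b + 18*c0 + 36*c1 (objective: simpler).

-- ===== PORT A =====
-- Literal port of A: each Python for-loop is one fold over its range; the state is
-- (result so far, counter i); a `some` result models Python's early return, which
-- every outer loop then passes through unchanged.
def pvStepA0 (a0 a1 b c0 c1 C1 C0 B A1 : Int) (s : Option Int × Int) (A0 : Int) :
    Option Int × Int :=
  match s with
  | (some r, i) => (some r, i)
  | (none, i) =>
    if C1 == c1 && C0 == c0 && B == b && A1 == a1 && A0 == a0 then (some i, i)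
    else (none, i + 1)

def pvLoopA0 (a0 a1 b c0 c1 C1 C0 B A1 : Int) (s : Option Int × Int) : Option Int × Int :=
  (PySem.List.pyRange 0 3 1).foldl (pvStepA0 a0 a1 b c0 c1 C1 C0 B A1) s

def pvStepA1 (a0 a1 b c0 c1 C1 C0 B : Int) (s : Option Int × Int) (A1 : Int) :
    Option Int × Int :=
  pvLoopA0 a0 a1 b c0 c1 C1 C0 B A1 s

def pvLoopA1 (a0 a1 b c0 c1 C1 C0 B : Int) (s : Option Int × Int) : Option Int × Int :=
  (PySem.List.pyRange 0 3 1).foldl (pvStepA1 a0 a1 b c0 c1 C1 C0 B) s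

def pvStepB (a0 a1 b c0 c1 C1 C0 : Int) (s : Option Int × Int) (B : Int) :
    Option Int × Int :=
  pvLoopA1 a0 a1 b c0 c1 C1 C0 B s

def pvLoopB (a0 a1 b c0 c1 C1 C0 : Int) (s : Option Int × Int) : Option Int × Int :=
  (PySem.List.pyRange 0 2 1).foldl (pvStepB a0 a1 b c0 c1 C1 C0) s

def pvStepC0 (a0 a1 b c0 c1 C1 : Int) (s : Option Int × Int) (C0 : Int) :
    Option Int × Int :=
  pvLoopB a0 a1 b c0 c1 C1 C0 s

def pvLoopC0 (a0 a1 b c0 c1 C1 : Int) (s : Option Int × Int) : Option Int × Int :=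
  (PySem.List.pyRange 0 2 1).foldl (pvStepC0 a0 a1 b c0 c1 C1) s

def pvStepC1 (a0 a1 b c0 c1 : Int) (s : Option Int × Int) (C1 : Int) : Option Int × Int :=
  pvLoopC0 a0 a1 b c0 c1 C1 s

def evansA3 (a0 : Int) (a1 : Int) (b : Int) (c0 : Int) (c1 : Int) : Option Int :=
  ((PySem.List.pyRange 0 2 1).foldl (pvStepC1 a0 a1 b c0 c1) ((none : Option Int), (0 : Int))).1

-- ===== PORT B =====
-- Port of B: range check (as in Source B's tuple-membership tests), then the closed form.
def evansA3_alt (a0 : Int) (a1 : Int) (b : Int) (c0 : Int) (c1 : Int) : Option Int :=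
  if a0 ∈ ([0, 1, 2] : List Int) ∧ a1 ∈ ([0, 1, 2] : List Int) ∧
     b ∈ ([0, 1] : List Int) ∧ c0 ∈ ([0, 1] : List Int) ∧ c1 ∈ ([0, 1] : List Int) then
    some (a0 + 3 * a1 + 9 * b + 18 * c0 + 36 * c1)
  else
    none

-- ===== PRECONDITION & SPEC =====
def Spec_evansA3 (a0 : Int) (a1 : Int) (b : Int) (c0 : Int) (c1 : Int) (out : Option Int) : Prop := out = evansA3_alt a0 a1 b c0 c1
instance (a0 : Int) (a1 : Int) (b : Int) (c0 : Int) (c1 : Int) (out : Option Int) : Decidable (Spec_evansA3 a0 a1 b c0 c1 out) := by unfold Spec_evansA3; infer_instance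

-- ===== CLAIM (what is proved, stated in full; the proofs are below) =====
def Claim_equal_evansA3 : Prop := ∀ (a0 : Int) (a1 : Int) (b : Int) (c0 : Int) (c1 : Int), Dom_evansA3 a0 a1 b c0 c1 → Spec_evansA3 a0 a1 b c0 c1 (evansA3 a0 a1 b c0 c1)

-- ===== LEMMAS AND PROOFS =====

theorem pvR2 : PySem.List.pyRange 0 2 1 = [0, 1] := by decide

theorem pvR3 : PySem.List.pyRange 0 3 1 = [0, 1, 2] := by decide

-- Folding a step that turns (none, i) into (none, i + c) over [0,1,2] adds 3*c.
theorem pvFold3 (g : (Option Int × Int) → Int → (Option Int × Int)) (c : Int)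
    (hg : ∀ (i : Int) (x : Int), x ∈ ([0, 1, 2] : List Int) → g (none, i) x = (none, i + c))
    (i : Int) :
    ([0, 1, 2] : List Int).foldl g (none, i) = (none, i + 3 * c) := by
  simp only [List.foldl]
  rw [hg i 0 (by simp), hg (i + c) 1 (by simp), hg (i + c + c) 2 (by simp)]
  simp only [Prod.mk.injEq, true_and]
  ring

-- Same over [0,1]: adds 2*c.
theorem pvFold2 (g : (Option Int × Int) → Int → (Option Int × Int)) (c : Int)
    (hg : ∀ (i : Int) (x : Int), x ∈ ([0, 1] : List Int) → g (none, i) x = (none, i + c))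
    (i : Int) :
    ([0, 1] : List Int).foldl g (none, i) = (none, i + 2 * c) := by
  simp only [List.foldl]
  rw [hg i 0 (by simp), hg (i + c) 1 (by simp)]
  simp only [Prod.mk.injEq, true_and]
  ring

-- If the loop condition is false on the whole grid, A falls through all 72 cells to none.
theorem evansA3_none (a0 a1 b c0 c1 : Int)
    (hc : ∀ C1 C0 B A1 A0 : Int, C1 ∈ ([0, 1] : List Int) → C0 ∈ ([0, 1] : List Int) →
      B ∈ ([0, 1] : List Int) → A1 ∈ ([0, 1, 2] : List Int) → A0 ∈ ([0, 1, 2] : List Int) →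
      (C1 == c1 && C0 == c0 && B == b && A1 == a1 && A0 == a0) = false) :
    evansA3 a0 a1 b c0 c1 = none := by
  have h0 : ∀ C1 C0 B A1 : Int, C1 ∈ ([0, 1] : List Int) → C0 ∈ ([0, 1] : List Int) →
      B ∈ ([0, 1] : List Int) → A1 ∈ ([0, 1, 2] : List Int) → ∀ i : Int,
      pvLoopA0 a0 a1 b c0 c1 C1 C0 B A1 (none, i) = (none, i + 3) := by
    intro C1 C0 B A1 m1 m2 m3 m4 i
    unfold pvLoopA0
    rw [pvR3]
    have := pvFold3 (pvStepA0 a0 a1 b c0 c1 C1 C0 B A1) 1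
      (fun j x hx => by
        simp only [pvStepA0]
        rw [hc C1 C0 B A1 x m1 m2 m3 m4 hx]
        simp) i
    simpa using this
  have h1 : ∀ C1 C0 B : Int, C1 ∈ ([0, 1] : List Int) → C0 ∈ ([0, 1] : List Int) →
      B ∈ ([0, 1] : List Int) → ∀ i : Int,
      pvLoopA1 a0 a1 b c0 c1 C1 C0 B (none, i) = (none, i + 9) := by
    intro C1 C0 B m1 m2 m3 i
    unfold pvLoopA1
    rw [pvR3]
    have := pvFold3 (pvStepA1 a0 a1 b c0 c1 C1 C0 B) 3
      (fun j x hx => by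
        simp only [pvStepA1]
        exact h0 C1 C0 B x m1 m2 m3 hx j) i
    simpa using this
  have h2 : ∀ C1 C0 : Int, C1 ∈ ([0, 1] : List Int) → C0 ∈ ([0, 1] : List Int) → ∀ i : Int,
      pvLoopB a0 a1 b c0 c1 C1 C0 (none, i) = (none, i + 18) := by
    intro C1 C0 m1 m2 i
    unfold pvLoopB
    rw [pvR2]
    have := pvFold2 (pvStepB a0 a1 b c0 c1 C1 C0) 9
      (fun j x hx => by
        simp only [pvStepB]
        exact h1 C1 C0 x m1 m2 hx j) i
    simpa using this
  have h3 : ∀ C1 : Int, C1 ∈ ([0, 1] : List Int) → ∀ i : Int,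
      pvLoopC0 a0 a1 b c0 c1 C1 (none, i) = (none, i + 36) := by
    intro C1 m1 i
    unfold pvLoopC0
    rw [pvR2]
    have := pvFold2 (pvStepC0 a0 a1 b c0 c1 C1) 18
      (fun j x hx => by
        simp only [pvStepC0]
        exact h2 C1 x m1 hx j) i
    simpa using this
  have h4 : ([0, 1] : List Int).foldl (pvStepC1 a0 a1 b c0 c1) (none, 0) = (none, 72) := by
    have := pvFold2 (pvStepC1 a0 a1 b c0 c1) 36
      (fun j x hx => by
        simp only [pvStepC1]
        exact h3 x hx j) 0
    simpa using this
  unfold evansA3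
  rw [pvR2, h4]

-- ===== VERDICT (by name: the statement is the Claim_ definition above) =====
theorem evansA3_spec : Claim_equal_evansA3 := by
  intro a0 a1 b c0 c1 _
  unfold Spec_evansA3
  by_cases h0 : a0 ∈ ([0, 1, 2] : List Int) <;>
  by_cases h1 : a1 ∈ ([0, 1, 2] : List Int) <;>
  by_cases h2 : b ∈ ([0, 1] : List Int) <;>
  by_cases h3 : c0 ∈ ([0, 1] : List Int) <;>
  by_cases h4 : c1 ∈ ([0, 1] : List Int)
  case pos =>
    simp only [List.mem_cons, List.not_mem_nil, or_false] at h0 h1 h2 h3 h4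
    rcases h0 with rfl | rfl | rfl <;> rcases h1 with rfl | rfl | rfl <;>
      rcases h2 with rfl | rfl <;> rcases h3 with rfl | rfl <;> rcases h4 with rfl | rfl <;>
      decide
  all_goals {
    have hB : evansA3_alt a0 a1 b c0 c1 = none := by
      unfold evansA3_alt
      rw [if_neg]
      tauto
    rw [hB]
    simp only [List.mem_cons, List.not_mem_nil, or_false, not_or] at h0 h1 h2 h3 h4
    apply evansA3_none
    intro C1 C0 B A1 A0 m1 m2 m3 m4 m5
    simp only [List.mem_cons, List.not_mem_nil, or_false] at m1 m2 m3 m4 m5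
    first
      | (rcases m5 with rfl | rfl | rfl <;>
          simp [Ne.symm h0.1, Ne.symm h0.2.1, Ne.symm h0.2.2])
      | (rcases m4 with rfl | rfl | rfl <;>
          simp [Ne.symm h1.1, Ne.symm h1.2.1, Ne.symm h1.2.2])
      | (rcases m3 with rfl | rfl <;> simp [Ne.symm h2.1, Ne.symm h2.2])
      | (rcases m2 with rfl | rfl <;> simp [Ne.symm h3.1, Ne.symm h3.2])
      | (rcases m1 with rfl | rfl <;> simp [Ne.symm h4.1, Ne.symm h4.2])
  }
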